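-- pv_equiv track=rewrite | github.com/Poke332/python-programming-uph | CodeForces/watermelon.py | watermelon
-- ===== SOURCE A (Python) =====
-- def watermelon(n):
--     if n < 4:
--         return "NO"
--     else:
--         for num1 in range(4, n+1):
--             if num1 % 2 == 0:
--                 num2 = n - num1
--                 if num2 % 2 == 0:
--                     return "YES"
--     return "NO"
-- ===== SOURCE B (Python) =====
-- def watermelon(n):
--     return "YES" if n >= 4 and n % 2 == 0 else "NO"
-- ===== Notes on version B (the rewrite author's own statement) =====
-- stated objective: faster
-- what changed: Replaced A's linear scan over range(4,n+1) looking for an even split with the O(1) parity test n>=4 and n even.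
import Mathlib
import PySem

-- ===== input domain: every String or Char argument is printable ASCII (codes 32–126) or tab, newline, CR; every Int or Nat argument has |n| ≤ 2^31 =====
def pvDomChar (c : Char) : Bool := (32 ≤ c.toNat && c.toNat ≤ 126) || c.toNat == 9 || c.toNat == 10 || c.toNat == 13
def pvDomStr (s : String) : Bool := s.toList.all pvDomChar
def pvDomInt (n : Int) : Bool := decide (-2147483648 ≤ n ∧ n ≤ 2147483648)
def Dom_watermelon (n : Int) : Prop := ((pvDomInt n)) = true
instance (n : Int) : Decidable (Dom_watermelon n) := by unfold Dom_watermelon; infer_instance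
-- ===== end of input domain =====

-- B replaces A's linear scan over range(4, n+1) with the O(1) test "n ≥ 4 and n even".

-- ===== PORT A =====
-- the for-loop of A: num1 runs from 4 up to n (the fuel counts the remaining iterations of
-- range(4, n+1), consumed lazily as Python's range is); returns "YES" at the first even num1
-- with (n - num1) even
def watermelonLoop (n : Int) : Nat → Int → String
  | 0, _ => "NO"
  | fuel + 1, num1 =>
    if PySem.Int.mod num1 2 = 0 then
      if PySem.Int.mod (n - num1) 2 = 0 then "YES"
      else watermelonLoop n fuel (num1 + 1)
    else watermelonLoop n fuel (num1 + 1)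

def watermelon (n : Int) : String :=
  if n < 4 then "NO"
  else watermelonLoop n (n + 1 - 4).toNat 4

-- ===== PORT B =====
def watermelon_alt (n : Int) : String :=
  if n ≥ 4 ∧ PySem.Int.mod n 2 = 0 then "YES" else "NO"

-- ===== PRECONDITION & SPEC =====
def Spec_watermelon (n : Int) (out : String) : Prop := out = watermelon_alt n
instance (n : Int) (out : String) : Decidable (Spec_watermelon n out) := by unfold Spec_watermelon; infer_instance

-- ===== CLAIM (what is proved, stated in full; the proofs are below) =====
def Claim_equal_watermelon : Prop := ∀ (n : Int), Dom_watermelon n → Spec_watermelon n (watermelon n)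

-- ===== LEMMAS AND PROOFS =====

-- if n is odd, no even num1 can make n - num1 even, so the loop falls through to "NO"
theorem watermelonLoop_odd (n : Int) (hn : PySem.Int.mod n 2 ≠ 0) :
    ∀ (fuel : Nat) (num1 : Int), watermelonLoop n fuel num1 = "NO" := by
  intro fuel
  induction fuel with
  | zero => intro num1; rfl
  | succ k ih =>
    intro num1
    rw [watermelonLoop]
    split_ifs with h1 h2
    · exfalso
      rw [PySem.Int.mod_eq_zero_iff_dvd] at h1 h2
      exact hn (by rw [PySem.Int.mod_eq_zero_iff_dvd]; omega)
    · exact ih (num1 + 1)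
    · exact ih (num1 + 1)

theorem watermelon_spec : Claim_equal_watermelon := by
  intro n _
  unfold Spec_watermelon watermelon watermelon_alt
  by_cases h4 : n < 4
  · simp [h4]
  · rw [if_neg h4]
    by_cases he : PySem.Int.mod n 2 = 0
    · -- n even: the first candidate 4 succeeds
      obtain ⟨k, hk⟩ : ∃ k, (n + 1 - 4).toNat = k + 1 :=
        ⟨(n - 4).toNat, by omega⟩
      rw [hk, watermelonLoop]
      have h42 : PySem.Int.mod (4:Int) 2 = 0 := by decide
      have hn4 : PySem.Int.mod (n - 4) 2 = 0 := by
        rw [PySem.Int.mod_eq_zero_iff_dvd] at he ⊢; omega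
      rw [if_pos h42, if_pos hn4, if_pos ⟨by omega, he⟩]
    · rw [watermelonLoop_odd n he, if_neg (fun ⟨_, h⟩ => he h)]
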